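-- pv_equiv track=rewrite | github.com/posl/comment_recommendation | script/mod_gen/1_time/en/223_B/2.py | solution
-- ===== SOURCE A (Python) =====
-- def solution(S):
--     # write your code in Python 3.6
--     min_str = S
--     max_str = S
--     for i in range(1, len(S)):
--         S = S[1:] + S[0]
--         if S < min_str:
--             min_str = S
--         if S > max_str:
--             max_str = S
--     return min_str, max_str
-- ===== SOURCE B (Python) =====
-- def solution(S):
--     n = len(S)
--     if n == 0:
--         return S, S
--     doubled = S + S
--     return (min(doubled[i:i + n] for i in range(n)),
--             max(doubled[i:i + n] for i in range(n)))
-- ===== Notes on version B (the rewrite author's own statement) =====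
-- stated objective: idiomatic
-- what changed: B replaces A's stateful rotate-in-place loop with running min/max comparisons by building each rotation as a slice of the doubled string S+S and taking the builtin min() and max() over them.
import Mathlib
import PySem

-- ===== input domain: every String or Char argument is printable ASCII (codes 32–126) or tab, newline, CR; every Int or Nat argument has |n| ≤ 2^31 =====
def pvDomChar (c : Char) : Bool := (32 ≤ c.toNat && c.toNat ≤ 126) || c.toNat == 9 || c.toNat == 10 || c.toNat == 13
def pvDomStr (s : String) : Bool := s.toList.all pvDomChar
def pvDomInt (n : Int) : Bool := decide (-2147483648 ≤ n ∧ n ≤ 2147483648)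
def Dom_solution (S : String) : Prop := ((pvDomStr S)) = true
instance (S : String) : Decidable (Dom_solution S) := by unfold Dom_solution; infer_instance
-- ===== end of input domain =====

-- B takes the min/max rotation as builtin min()/max() over slices of the doubled string S+S
-- instead of A's rotate-in-place loop with running comparisons (same cost, more idiomatic).
-- Both ports return the Python result pair (min_str, max_str) as a 2-element list.

-- ===== PORT A =====
-- one loop step 'S = S[1:] + S[0]' on code points; the 'none' branch of S[0] is unreachable
-- (the loop body only runs when len(S) ≥ 2, so S is never empty there); '[]' keeps the helper total
def rotStepA (s : List Char) : List Char :=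
  PySem.List.slice s (some 1) none ++
    (match PySem.List.pyGet? s 0 with
     | some c => [c]
     | none => [])

def solution (S : String) : List String :=
  let st := (PySem.List.pyRange 1 (PySem.Str.len S) 1).foldl
    (fun (st : List Char × List Char × List Char) _ =>
      let s' := rotStepA st.1
      (s', if s' < st.2.1 then s' else st.2.1, if st.2.2 < s' then s' else st.2.2))
    (S.toList, S.toList, S.toList)
  [String.ofList st.2.1, String.ofList st.2.2]

-- ===== PORT B =====
def solution_alt (S : String) : List String :=
  let cs := S.toList
  let n := cs.length
  if n = 0 then [S, S]
  else
    let d := cs ++ cs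
    let mn := (PySem.List.min? ((PySem.List.pyRange 0 (n : Int) 1).map
        (fun i => PySem.List.slice d (some i) (some (i + (n : Int))))) (fun x => x)).getD cs
    let mx := (PySem.List.max? ((PySem.List.pyRange 0 (n : Int) 1).map
        (fun i => PySem.List.slice d (some i) (some (i + (n : Int))))) (fun x => x)).getD cs
    [String.ofList mn, String.ofList mx]

-- ===== PRECONDITION & SPEC =====
def Spec_solution (S : String) (out : List String) : Prop := out = solution_alt S
instance (S : String) (out : List String) : Decidable (Spec_solution S out) := by unfold Spec_solution; infer_instance

-- ===== CLAIM (what is proved, stated in full; the proofs are below) =====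
def Claim_equal_solution : Prop := ∀ (S : String), Dom_solution S → Spec_solution S (solution S)

-- ===== LEMMAS AND PROOFS =====

-- the j-th left rotation of cs
def rotN (cs : List Char) (j : Nat) : List Char := cs.drop j ++ cs.take j

lemma rotStepA_rotN (cs : List Char) (j : Nat) (hj : j < cs.length) :
    rotStepA (rotN cs j) = rotN cs (j + 1) := by
  have hd : cs.drop j = cs[j] :: cs.drop (j + 1) := List.drop_eq_getElem_cons hj
  have ht : cs.take (j + 1) = cs.take j ++ [cs[j]] := by
    rw [List.take_add_one, List.getElem?_eq_getElem hj]; rfl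
  have hr : rotN cs j = cs[j] :: (cs.drop (j + 1) ++ cs.take j) := by
    rw [rotN, hd]; rfl
  have hg : PySem.List.pyGet? (rotN cs j) 0 = some cs[j] := by
    have h0 := PySem.List.pyGet?_natCast (rotN cs j) 0
    norm_num at h0
    rw [h0, hr]; rfl
  rw [rotStepA, PySem.List.slice_from_one, hg, hr, rotN, ht]
  simp

-- A's whole loop, started at the j-th rotation: final S is the (j+|l|)-th rotation and
-- (min_str, max_str) is the running min/max fold over the rotations the loop visited
lemma foldA (l : List Int) (cs : List Char) (j : Nat) (hj : j + l.length ≤ cs.length)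
    (mn mx : List Char) :
    l.foldl (fun (st : List Char × List Char × List Char) _ =>
        let s' := rotStepA st.1
        (s', if s' < st.2.1 then s' else st.2.1, if st.2.2 < s' then s' else st.2.2))
      (rotN cs j, mn, mx)
    = (rotN cs (j + l.length),
       ((List.range l.length).map (fun k => rotN cs (j + 1 + k))).foldl
         (fun (p : List Char × List Char) x =>
           (if x < p.1 then x else p.1, if p.2 < x then x else p.2)) (mn, mx)) := by
  induction l generalizing j mn mx with
  | nil => simp
  | cons a l ih =>
    have hjlt : j < cs.length := by simp at hj; omega
    have hj' : (j + 1) + l.length ≤ cs.length := by simp at hj; omega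
    have hstep := rotStepA_rotN cs j hjlt
    have hmap : (List.range (a :: l).length).map (fun k => rotN cs (j + 1 + k))
        = rotN cs (j + 1) :: (List.range l.length).map (fun k => rotN cs (j + 1 + 1 + k)) := by
      rw [List.length_cons, List.range_succ_eq_map, List.map_cons, List.map_map]
      refine congrArg₂ _ (by norm_num) ?_
      refine List.map_congr_left (fun k _ => ?_)
      simp only [Function.comp_apply]
      congr 1
      omega
    have hlen : j + (a :: l).length = (j + 1) + l.length := by simp; omega
    rw [hmap, hlen, List.foldl_cons, List.foldl_cons]
    simp only [hstep]
    exact ih (j + 1) hj' _ _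

-- B's slices of the doubled string are exactly the rotations, in order
lemma rots_eq (cs : List Char) :
    (PySem.List.pyRange 0 (cs.length : Int) 1).map
        (fun i => PySem.List.slice (cs ++ cs) (some i) (some (i + (cs.length : Int))))
      = (List.range cs.length).map (rotN cs) := by
  rw [PySem.List.pyRange_zero_nat, List.map_map]
  refine List.map_congr_left (fun k hk => ?_)
  rw [List.mem_range] at hk
  simp only [Function.comp_apply]
  rw [PySem.List.slice_natCast_add]
  rw [List.drop_append_of_le_length (by omega)]
  rw [List.take_append]
  have h1 : (cs.drop k).length = cs.length - k := by simp
  have h2 : cs.take (cs.length - (cs.drop k).length) = cs.take k := by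
    rw [h1]; congr 1; omega
  rw [List.take_of_length_le (by rw [h1]; omega), h2, rotN]

lemma min_fun_eq : (fun (m x : List Char) => if x < m then x else m) = min := by
  funext m x
  rcases lt_trichotomy x m with h | h | h
  · rw [if_pos h, min_eq_right h.le]
  · subst h; simp
  · rw [if_neg (by exact not_lt_of_gt h), min_eq_left h.le]

lemma max_fun_eq : (fun (m x : List Char) => if m < x then x else m) = max := by
  funext m x
  rcases lt_trichotomy m x with h | h | h
  · rw [if_pos h, max_eq_right h.le]
  · subst h; simp
  · rw [if_neg (by exact not_lt_of_gt h), max_eq_left h.le]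

-- PySem.List.min?_id_cons / max?_id_cons, restated with the LT/Decidable instances the
-- ports elaborate with (the library statement carries the LinearOrder-derived ones)
lemma min?_cons_eq (x : List Char) (t : List (List Char)) :
    (PySem.List.min? (x :: t) (fun y => y)) = some (t.foldl min x) := by
  have h := PySem.List.min?_id_cons x t
  convert h using 2

lemma max?_cons_eq (x : List Char) (t : List (List Char)) :
    (PySem.List.max? (x :: t) (fun y => y)) = some (t.foldl max x) := by
  have h := PySem.List.max?_id_cons x t
  convert h using 2

theorem solution_eq_alt (S : String) : solution S = solution_alt S := by
  by_cases h0 : S.toList.length = 0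
  · have hnil : S.toList = [] := List.eq_nil_of_length_eq_zero h0
    rw [solution, solution_alt]
    simp only [h0]
    rw [PySem.Str.len_eq, h0]
    rw [show ((0 : Nat) : Int) = (0 : Int) from rfl,
      PySem.List.pyRange_one_eq_nil (by norm_num)]
    simp [String.ofList_toList]
  · set cs := S.toList with hcs
    set n := cs.length with hn
    have hpos : 0 < n := Nat.pos_of_ne_zero h0
    have hlenS : PySem.Str.len S = (n : Int) := by rw [PySem.Str.len_eq]
    have hlenl : (PySem.List.pyRange 1 (n : Int) 1).length = n - 1 := by
      rw [PySem.List.length_pyRange_one]; omega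
    have hrot0 : rotN cs 0 = cs := by simp [rotN]
    have hA := foldA (PySem.List.pyRange 1 (n : Int) 1) cs 0 (by omega) cs cs
    rw [hrot0, hlenl] at hA
    have hB := rots_eq cs
    have hsplit : (List.range n).map (rotN cs)
        = cs :: (List.range (n - 1)).map (fun k => rotN cs (0 + 1 + k)) := by
      rw [show n = (n - 1) + 1 by omega, List.range_succ_eq_map, List.map_cons, List.map_map]
      rw [hrot0]
      refine congrArg₂ _ rfl (List.map_congr_left (fun k _ => ?_))
      simp only [Function.comp_apply]
      congr 1
      omega
    rw [solution, solution_alt]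
    simp only [← hcs, ← hn, if_neg h0, hlenS]
    rw [hA, hB, hsplit]
    rw [min?_cons_eq, max?_cons_eq]
    simp only [Option.getD_some]
    rw [PySem.List.foldl_prod_mk (fun m x => if x < m then x else m)
      (fun m x => if m < x then x else m), min_fun_eq, max_fun_eq]

-- ===== VERDICT (by name: the statement is the Claim_ definition above) =====
theorem solution_spec : Claim_equal_solution := by
  intro S _
  exact solution_eq_alt S
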